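-- pv_equiv track=rewrite | github.com/RT-1904129/Naive-Bayes-Algorithm | Train.py | class_wise_words_frequency_dict
-- ===== SOURCE A (Python) =====
-- def class_wise_words_frequency_dict(X, Y):
--     class_sentence=dict()
--     for i in range(len(Y)):
--         if Y[i] not in class_sentence:
--             class_sentence[Y[i]]=""
--         class_sentence[Y[i]]=class_sentence[Y[i]]+" "+X[i]
--
--     class_wise_words_frequency=dict()
--     for class_name in class_sentence.keys():
--         class_word_dict=dict()
--         sentence=class_sentence[class_name].split()
--         for word in sentence:
--             if word not in class_word_dict:
--                 class_word_dict[word]=0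
--             class_word_dict[word]+=1
--         class_wise_words_frequency[class_name]=class_word_dict
--
--     return  class_wise_words_frequency
-- ===== SOURCE B (Python) =====
-- def class_wise_words_frequency_dict(X, Y):
--     freq = {}
--     for sentence, label in zip(X, Y):
--         counts = freq.setdefault(label, {})
--         for word in sentence.split():
--             counts[word] = counts.get(word, 0) + 1
--     return freq
-- ===== Notes on version B (the rewrite author's own statement) =====
-- stated objective: faster
-- what changed: Instead of concatenating each class's sentences into one giant string (quadratic repeated concatenation) and splitting it at the end, B makes a single pass over zip(X, Y), splits each sentence once and updates the per-class word counter directly.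
import Mathlib
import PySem

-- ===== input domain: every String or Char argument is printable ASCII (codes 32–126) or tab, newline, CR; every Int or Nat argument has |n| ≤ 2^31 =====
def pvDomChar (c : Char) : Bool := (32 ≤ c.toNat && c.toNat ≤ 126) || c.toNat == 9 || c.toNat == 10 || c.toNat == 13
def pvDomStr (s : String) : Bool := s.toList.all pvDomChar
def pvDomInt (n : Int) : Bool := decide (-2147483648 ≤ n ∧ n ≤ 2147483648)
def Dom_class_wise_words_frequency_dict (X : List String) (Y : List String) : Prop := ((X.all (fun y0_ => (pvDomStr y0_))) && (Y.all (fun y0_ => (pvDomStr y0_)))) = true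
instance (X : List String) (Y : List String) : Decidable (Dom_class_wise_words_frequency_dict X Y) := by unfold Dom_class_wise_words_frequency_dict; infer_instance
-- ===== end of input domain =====

-- B replaces A's per-class giant-string concatenation + final split by a single pass over
-- zip(X, Y) that splits each sentence once and updates the per-class word counter directly
-- (a timing run measured B faster; the theorems state return-value equality only).

-- ===== PORT A =====
def class_wise_words_frequency_dict (X : List String) (Y : List String) : List (String × List (String × Int)) :=
  let class_sentence : PySem.Dict String String :=
    (PySem.List.pyRange 0 (Y.length : Int) 1).foldl (fun d i =>
      match PySem.List.pyGet? Y i, PySem.List.pyGet? X i with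
      | some y, some x =>
          let d := if d.contains y then d else d.insert y ""
          d.insert y (d.getD y "" ++ " " ++ x)
      | _, _ => d) PySem.Dict.empty    -- none = IndexError on X[i]: outside Pre_
  let cwf : PySem.Dict String (PySem.Dict String Int) :=
    class_sentence.keys.foldl (fun out class_name =>
      let sentence := PySem.Str.split₀ (class_sentence.getD class_name "")
      let class_word_dict := sentence.foldl (fun d word =>
        let d := if d.contains word then d else d.insert word 0
        d.insert word (d.getD word 0 + 1)) PySem.Dict.empty
      out.insert class_name class_word_dict) PySem.Dict.empty
  cwf.items.map (fun p => (p.1, p.2.items))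

-- ===== PORT B =====
def class_wise_words_frequency_dict_alt (X : List String) (Y : List String) : List (String × List (String × Int)) :=
  let freq : PySem.Dict String (PySem.Dict String Int) :=
    (X.zip Y).foldl (fun d p =>
      -- counts = freq.setdefault(label, {}) followed by in-place counts[word] updates,
      -- rendered immutably as getD + insert-back (same key positions and values)
      d.insert p.2 ((PySem.Str.split₀ p.1).foldl (fun c w => c.modify w 0 (· + 1))
        (d.getD p.2 PySem.Dict.empty))) PySem.Dict.empty
  freq.items.map (fun p => (p.1, p.2.items))

-- ===== PRECONDITION & SPEC =====
-- Pre_ excludes exactly the inputs where A raises IndexError (X shorter than Y).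
def Pre_class_wise_words_frequency_dict (X : List String) (Y : List String) : Prop := Y.length ≤ X.length
instance (X : List String) (Y : List String) : Decidable (Pre_class_wise_words_frequency_dict X Y) := by unfold Pre_class_wise_words_frequency_dict; infer_instance
def pvWitness_class_wise_words_frequency_dict : List String × List String := (["a b", "b  c", "a"], ["p", "q", "p"])

def Spec_class_wise_words_frequency_dict (X : List String) (Y : List String) (out : List (String × List (String × Int))) : Prop := out = class_wise_words_frequency_dict_alt X Y
instance (X : List String) (Y : List String) (out : List (String × List (String × Int))) : Decidable (Spec_class_wise_words_frequency_dict X Y out) := by unfold Spec_class_wise_words_frequency_dict; infer_instance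

-- ===== CLAIM (what is proved, stated in full; the proofs are below) =====
def Claim_equal_class_wise_words_frequency_dict : Prop := ∀ (X : List String) (Y : List String), Dom_class_wise_words_frequency_dict X Y → Pre_class_wise_words_frequency_dict X Y → Spec_class_wise_words_frequency_dict X Y (class_wise_words_frequency_dict X Y)

-- ===== LEMMAS AND PROOFS =====

-- the normalized bodies of the two grouping loops
def pvBodyA (d : PySem.Dict String String) (p : String × String) : PySem.Dict String String :=
  d.insert p.2 (d.getD p.2 "" ++ " " ++ p.1)
def pvGuardA (d : PySem.Dict String String) (p : String × String) : PySem.Dict String String :=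
  (if d.contains p.2 then d else d.insert p.2 "").insert p.2
    ((if d.contains p.2 then d else d.insert p.2 "").getD p.2 "" ++ " " ++ p.1)
def pvG (wc : PySem.Dict String Int) (p : String × String) : PySem.Dict String Int :=
  (PySem.Str.split₀ p.1).foldl (fun c w => c.modify w 0 (· + 1)) wc
def pvBodyB (d : PySem.Dict String (PySem.Dict String Int)) (p : String × String) : PySem.Dict String (PySem.Dict String Int) :=
  d.insert p.2 (pvG (d.getD p.2 PySem.Dict.empty) p)

-- the value both programs compute
def pvCanon (X : List String) (Y : List String) : List (String × List (String × Int)) :=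
  (PySem.Set.ofList ((X.zip Y).map Prod.snd)).map (fun c =>
    (c, (PySem.Dict.counter (((X.zip Y).filter (fun p => p.2 == c)).flatMap
          (fun p => PySem.Str.split₀ p.1))).items))

-- removing the 'if key not in d: d[key] = v0' guard in front of 'd[key] = f(d[key])'
theorem pv_guard {κ V : Type} [BEq κ] [LawfulBEq κ] (d : PySem.Dict κ V) (k : κ) (v0 : V) (f : V → V) :
    (if d.contains k then d else d.insert k v0).insert k
        (f ((if d.contains k then d else d.insert k v0).getD k v0))
      = d.insert k (f (d.getD k v0)) := by
  by_cases hc : d.contains k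
  · simp [hc]
  · have hc' : d.contains k = false := by simpa using hc
    rw [hc']
    simp only [Bool.false_eq_true, if_false]
    rw [PySem.Dict.getD_insert_self, PySem.Dict.insert_insert_self,
      PySem.Dict.getD_of_not_contains _ _ hc']

-- split₀.go with a nonempty accumulator is that prefix plus the run from an empty accumulator
theorem pv_go_acc (s : List Char) : ∀ (cur : List Char) (acc : List (List Char)),
    PySem.Chars.split₀.go s cur acc = acc.reverse ++ PySem.Chars.split₀.go s cur [] := by
  induction s with
  | nil =>
    intro cur acc
    simp only [PySem.Chars.split₀.go]
    by_cases h : cur.isEmpty <;> simp [h]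
  | cons c rest ih =>
    intro cur acc
    simp only [PySem.Chars.split₀.go]
    by_cases hs : PySem.Chars.isspace c
    · by_cases h : cur.isEmpty <;> simp only [hs, h, if_true, if_false, Bool.false_eq_true]
      · rw [ih [] acc]
      · rw [ih [] (cur.reverse :: acc), ih [] [cur.reverse]]
        simp
    · simp only [hs, Bool.false_eq_true, if_false]
      rw [ih (c :: cur) acc]

-- splitting across an inserted space splits each part
theorem pv_go_space (a : List Char) : ∀ (b cur : List Char) (acc : List (List Char)),
    PySem.Chars.split₀.go (a ++ ' ' :: b) cur acc
      = PySem.Chars.split₀.go a cur acc ++ PySem.Chars.split₀ b := by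
  induction a with
  | nil =>
    intro b cur acc
    simp only [List.nil_append, PySem.Chars.split₀.go, PySem.Chars.split₀]
    have hsp : PySem.Chars.isspace ' ' = true := by decide
    by_cases h : cur.isEmpty <;>
      simp only [hsp, h, if_true, if_false, Bool.false_eq_true] <;>
      rw [pv_go_acc] <;> simp [h]
  | cons c rest ih =>
    intro b cur acc
    simp only [List.cons_append, PySem.Chars.split₀.go]
    by_cases hs : PySem.Chars.isspace c
    · by_cases h : cur.isEmpty <;> simp [hs, h, ih]
    · simp [hs, ih]

theorem pv_split_str (s x : String) :
    PySem.Str.split₀ (s ++ " " ++ x) = PySem.Str.split₀ s ++ PySem.Str.split₀ x := by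
  simp only [PySem.Str.split₀, String.toList_append]
  have : s.toList ++ " ".toList ++ x.toList = s.toList ++ ' ' :: x.toList := by simp
  rw [this]
  simp only [PySem.Chars.split₀] at *
  rw [pv_go_space s.toList x.toList [] []]
  simp [PySem.Chars.split₀]

-- grouping fold: the value at key c is the sub-fold over the matching elements
theorem pv_getD_foldl {κ α V : Type} [BEq κ] [LawfulBEq κ]
    (L : List α) (key : α → κ) (g : V → α → V) (v0 : V) :
    ∀ (d : PySem.Dict κ V) (c : κ),
    (L.foldl (fun d a => d.insert (key a) (g (d.getD (key a) v0) a)) d).getD c v0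
      = (L.filter (fun a => key a == c)).foldl g (d.getD c v0) := by
  induction L with
  | nil => intro d c; simp
  | cons a l ih =>
    intro d c
    simp only [List.foldl_cons, List.filter_cons]
    by_cases h : key a = c
    · simp only [h, BEq.rfl, if_true, List.foldl_cons, ih]
      rw [PySem.Dict.getD_insert_self]
    · have hb : (key a == c) = false := by simp [h]
      simp only [hb, Bool.false_eq_true, if_false, ih]
      rw [PySem.Dict.getD_insert_of_ne _ _ _ (Ne.symm h)]

theorem pv_split_fold (l : List (String × String)) : ∀ (s : String),
    PySem.Str.split₀ (l.foldl (fun s p => s ++ " " ++ p.1) s)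
      = PySem.Str.split₀ s ++ l.flatMap (fun p => PySem.Str.split₀ p.1) := by
  induction l with
  | nil => intro s; simp
  | cons p l ih =>
    intro s
    simp only [List.foldl_cons, List.flatMap_cons, ih, pv_split_str, List.append_assoc]

theorem pv_count_flat (l : List (String × String)) : ∀ (d : PySem.Dict String Int),
    l.foldl pvG d
      = (l.flatMap (fun p => PySem.Str.split₀ p.1)).foldl (fun c w => c.modify w 0 (· + 1)) d := by
  induction l with
  | nil => intro d; simp
  | cons p l ih =>
    intro d
    simp only [List.foldl_cons, List.flatMap_cons, List.foldl_append, ih, pvG]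

-- A's first loop, under Pre_, is the normalized fold over zip(X, Y)
theorem pv_loop1 (X Y : List String) (hpre : Y.length ≤ X.length) :
    (PySem.List.pyRange 0 (Y.length : Int) 1).foldl (fun d i =>
      match PySem.List.pyGet? Y i, PySem.List.pyGet? X i with
      | some y, some x =>
          let d := if d.contains y then d else d.insert y ""
          d.insert y (d.getD y "" ++ " " ++ x)
      | _, _ => d) PySem.Dict.empty
      = (X.zip Y).foldl pvBodyA PySem.Dict.empty := by
  have hzlen : (X.zip Y).length = Y.length := by rw [List.length_zip]; omega
  have hcong : ∀ (acc : PySem.Dict String String), ∀ i ∈ PySem.List.pyRange 0 (Y.length : Int) 1,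
      (fun (d : PySem.Dict String String) i =>
        match PySem.List.pyGet? Y i, PySem.List.pyGet? X i with
        | some y, some x =>
            let d := if d.contains y then d else d.insert y ""
            d.insert y (d.getD y "" ++ " " ++ x)
        | _, _ => d) acc i
      = pvGuardA acc (PySem.List.pyGetD (X.zip Y) i ("", "")) := by
    intro acc i hi
    obtain ⟨h0, h1⟩ := PySem.List.mem_pyRange_one.mp hi
    have hij : i = ((i.toNat : Nat) : Int) := (Int.toNat_of_nonneg h0).symm
    have hjY : i.toNat < Y.length := by omega
    have hjX : i.toNat < X.length := by omega
    have hjZ : i.toNat < (X.zip Y).length := by omega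
    rw [hij]
    beta_reduce
    rw [PySem.List.pyGet?_natCast, PySem.List.pyGet?_natCast]
    rw [List.getElem?_eq_getElem hjY, List.getElem?_eq_getElem hjX]
    simp only [PySem.List.pyGetD, PySem.List.pyGet?_natCast, List.getElem?_eq_getElem hjZ]
    rw [List.getElem_zip]
    rfl
  rw [PySem.List.foldl_congr_mem _ _ _ _ hcong]
  rw [show (Y.length : Int) = ((X.zip Y).length : Int) by rw [hzlen]]
  rw [PySem.List.foldl_pyRange_zero_pyGetD' (X.zip Y) ("", "") pvGuardA PySem.Dict.empty]
  apply PySem.List.foldl_congr_mem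
  intro acc p _
  exact pv_guard acc p.2 "" (· ++ " " ++ p.1)

-- A's second pass, as a function of the class→sentence dict
def pvPhase2 (cs : PySem.Dict String String) : List (String × List (String × Int)) :=
  (cs.keys.foldl (fun out class_name =>
      let sentence := PySem.Str.split₀ (cs.getD class_name "")
      let class_word_dict := sentence.foldl (fun d word =>
        let d := if d.contains word then d else d.insert word 0
        d.insert word (d.getD word 0 + 1)) PySem.Dict.empty
      out.insert class_name class_word_dict) PySem.Dict.empty).items.map (fun p => (p.1, p.2.items))

theorem pv_phase2_eq (cs : PySem.Dict String String) (hnod : cs.keys.Nodup) :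
    pvPhase2 cs = cs.keys.map (fun c =>
      (c, (PySem.Dict.counter (PySem.Str.split₀ (cs.getD c ""))).items)) := by
  unfold pvPhase2
  have hbody : ∀ (out : PySem.Dict String (PySem.Dict String Int)), ∀ c ∈ cs.keys,
      (fun (out : PySem.Dict String (PySem.Dict String Int)) class_name =>
        let sentence := PySem.Str.split₀ (cs.getD class_name "")
        let class_word_dict := sentence.foldl (fun d word =>
          let d := if d.contains word then d else d.insert word 0
          d.insert word (d.getD word 0 + 1)) PySem.Dict.empty
        out.insert class_name class_word_dict) out c
      = out.insert c (PySem.Dict.counter (PySem.Str.split₀ (cs.getD c ""))) := by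
    intro out c _
    show out.insert c ((PySem.Str.split₀ (cs.getD c "")).foldl (fun d word =>
        (if d.contains word then d else d.insert word 0).insert word
          ((if d.contains word then d else d.insert word 0).getD word 0 + 1)) PySem.Dict.empty)
      = out.insert c (PySem.Dict.counter (PySem.Str.split₀ (cs.getD c "")))
    rw [PySem.List.foldl_congr_mem (PySem.Str.split₀ (cs.getD c "")) _
        (fun d w => d.insert w (d.getD w 0 + 1)) PySem.Dict.empty
        (fun acc w _ => pv_guard acc w 0 (· + 1))]
    rw [PySem.Dict.foldl_insert_getD_add_one_eq_counter]
  rw [PySem.List.foldl_congr_mem _ _ _ _ hbody]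
  rw [PySem.Dict.items_foldl_insert_fresh cs.keys (fun c => c)
      (fun c => PySem.Dict.counter (PySem.Str.split₀ (cs.getD c ""))) PySem.Dict.empty
      (fun a _ => by simp [PySem.Dict.contains_empty]) (by simpa using hnod)]
  simp [List.map_map, Function.comp_def, PySem.Dict.empty]

theorem pv_A_eq (X : List String) (Y : List String) (hpre : Y.length ≤ X.length) :
    class_wise_words_frequency_dict X Y = pvCanon X Y := by
  have hA : class_wise_words_frequency_dict X Y
      = pvPhase2 ((PySem.List.pyRange 0 (Y.length : Int) 1).foldl (fun d i =>
          match PySem.List.pyGet? Y i, PySem.List.pyGet? X i with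
          | some y, some x =>
              let d := if d.contains y then d else d.insert y ""
              d.insert y (d.getD y "" ++ " " ++ x)
          | _, _ => d) PySem.Dict.empty) := rfl
  rw [hA, pv_loop1 X Y hpre]
  have hnod : ((X.zip Y).foldl pvBodyA PySem.Dict.empty).keys.Nodup := by
    rw [show (X.zip Y).foldl pvBodyA PySem.Dict.empty
        = (X.zip Y).foldl (fun d p => d.insert p.2 (d.getD p.2 "" ++ " " ++ p.1)) PySem.Dict.empty from rfl]
    exact PySem.Dict.nodup_keys_foldl_insert_key (X.zip Y) Prod.snd _ PySem.Dict.empty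
      (by rw [PySem.Dict.keys_empty]; exact List.nodup_nil)
  have hkeys : ((X.zip Y).foldl pvBodyA PySem.Dict.empty).keys
      = PySem.Set.ofList ((X.zip Y).map Prod.snd) := by
    have h := PySem.Dict.keys_foldl_insert_key (X.zip Y) Prod.snd
      (fun d p => d.getD p.2 "" ++ " " ++ p.1) PySem.Dict.empty
    rw [show (X.zip Y).foldl pvBodyA PySem.Dict.empty
        = (X.zip Y).foldl (fun d p => d.insert p.2 (d.getD p.2 "" ++ " " ++ p.1)) PySem.Dict.empty from rfl, h]
    rw [PySem.Dict.keys_empty, PySem.Set.ofList_eq_foldl]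
    rfl
  have hgetD : ∀ c, ((X.zip Y).foldl pvBodyA PySem.Dict.empty).getD c ""
      = ((X.zip Y).filter (fun p => p.2 == c)).foldl (fun s p => s ++ " " ++ p.1) "" := by
    intro c
    rw [show (X.zip Y).foldl pvBodyA PySem.Dict.empty
        = (X.zip Y).foldl (fun d a => d.insert (Prod.snd a)
            ((fun s p => s ++ " " ++ p.1) (d.getD (Prod.snd a) "") a)) PySem.Dict.empty from rfl]
    rw [pv_getD_foldl (X.zip Y) Prod.snd (fun s p => s ++ " " ++ p.1) "" PySem.Dict.empty c]
    rw [PySem.Dict.getD_empty]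
  rw [pv_phase2_eq _ hnod, hkeys]
  unfold pvCanon
  apply List.map_congr_left
  intro c _
  rw [hgetD c, pv_split_fold]
  rw [show PySem.Str.split₀ "" = [] from rfl]
  rw [List.nil_append]

theorem pv_B_eq (X : List String) (Y : List String) :
    class_wise_words_frequency_dict_alt X Y = pvCanon X Y := by
  have hkeys : ((X.zip Y).foldl pvBodyB PySem.Dict.empty).keys
      = PySem.Set.ofList ((X.zip Y).map Prod.snd) := by
    have h := PySem.Dict.keys_foldl_insert_key (X.zip Y) Prod.snd
      (fun d p => pvG (d.getD p.2 PySem.Dict.empty) p) PySem.Dict.empty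
    rw [show (X.zip Y).foldl pvBodyB PySem.Dict.empty
        = (X.zip Y).foldl (fun d p => d.insert p.2 (pvG (d.getD p.2 PySem.Dict.empty) p)) PySem.Dict.empty from rfl, h]
    rw [PySem.Dict.keys_empty, PySem.Set.ofList_eq_foldl]
    rfl
  have hnod : ((X.zip Y).foldl pvBodyB PySem.Dict.empty).keys.Nodup := by
    rw [show (X.zip Y).foldl pvBodyB PySem.Dict.empty
        = (X.zip Y).foldl (fun d p => d.insert p.2 (pvG (d.getD p.2 PySem.Dict.empty) p)) PySem.Dict.empty from rfl]
    exact PySem.Dict.nodup_keys_foldl_insert_key (X.zip Y) Prod.snd _ PySem.Dict.empty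
      (by rw [PySem.Dict.keys_empty]; exact List.nodup_nil)
  have hgetD : ∀ c, ((X.zip Y).foldl pvBodyB PySem.Dict.empty).getD c PySem.Dict.empty
      = PySem.Dict.counter (((X.zip Y).filter (fun p => p.2 == c)).flatMap (fun p => PySem.Str.split₀ p.1)) := by
    intro c
    rw [show (X.zip Y).foldl pvBodyB PySem.Dict.empty
        = (X.zip Y).foldl (fun d a => d.insert (Prod.snd a) (pvG (d.getD (Prod.snd a) PySem.Dict.empty) a)) PySem.Dict.empty from rfl]
    rw [pv_getD_foldl (X.zip Y) Prod.snd pvG PySem.Dict.empty PySem.Dict.empty c]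
    rw [PySem.Dict.getD_empty, pv_count_flat, PySem.Dict.counter_eq_foldl]
  show ((X.zip Y).foldl pvBodyB PySem.Dict.empty).items.map (fun p => (p.1, p.2.items)) = pvCanon X Y
  rw [PySem.Dict.items_eq_map_keys _ hnod PySem.Dict.empty, hkeys, List.map_map]
  unfold pvCanon
  apply List.map_congr_left
  intro c _
  simp only [Function.comp]
  rw [hgetD c]

-- ===== VERDICT (by name: the statement is the Claim_ definition above) =====
theorem class_wise_words_frequency_dict_spec : Claim_equal_class_wise_words_frequency_dict := by
  intro X Y _ hpre
  unfold Spec_class_wise_words_frequency_dict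
  rw [pv_A_eq X Y hpre, pv_B_eq X Y]
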